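-- pv_equiv track=rewrite | github.com/AlluringCherish/webbench | results/Software-web-EvoMAC/web_promptchaos_seed3/VirtualMuseum/app.py | generate_new_id
-- ===== SOURCE A (Python) =====
-- def generate_new_id(lines):
--     # lines are full lines from file, first field is id (int)
--     max_id = 0
--     for line in lines:
--         parts = line.split('|')
--         try:
--             id_ = int(parts[0])
--             if id_ > max_id:
--                 max_id = id_
--         except (ValueError, IndexError):
--             continue
--     return max_id + 1
-- ===== SOURCE B (Python) =====
-- def _parse_id(line):
--     try:
--         return int(line.split('|')[0])
--     except ValueError:
--         return None
--
-- def generate_new_id(lines):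
--     # sort the parsed ids descending; the new id is one past the top positive one
--     ids = sorted((v for v in map(_parse_id, lines) if v is not None), reverse=True)
--     if ids and ids[0] > 0:
--         return ids[0] + 1
--     return 1
-- ===== Notes on version B (the rewrite author's own statement) =====
-- stated objective: alternative
-- what changed: Replaces A's inline running-max accumulator with a sort-based selection: parse every first field, sort the ids descending, and return the head plus one (or 1 if no id is positive).
import Mathlib
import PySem

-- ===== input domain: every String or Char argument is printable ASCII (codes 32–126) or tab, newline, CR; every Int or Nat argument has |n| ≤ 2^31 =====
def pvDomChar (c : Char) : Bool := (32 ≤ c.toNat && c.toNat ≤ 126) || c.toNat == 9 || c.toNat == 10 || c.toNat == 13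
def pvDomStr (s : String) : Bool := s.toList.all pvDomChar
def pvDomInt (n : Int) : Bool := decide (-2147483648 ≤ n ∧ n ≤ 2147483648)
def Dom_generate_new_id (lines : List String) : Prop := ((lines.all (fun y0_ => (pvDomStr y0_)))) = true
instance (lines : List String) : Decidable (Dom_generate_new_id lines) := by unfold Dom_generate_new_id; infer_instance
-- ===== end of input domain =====

-- B replaces A's running-max loop by sort-then-select: sort the parsed ids descending and take the head + 1.

-- ===== PORT A =====
-- running-max loop, exactly A's shape (try/except = the two none branches)
def generate_new_id (lines : List String) : Int :=
  (lines.foldl (fun max_id line =>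
      let parts := (PySem.Str.split? line "|").getD []
      match PySem.List.pyGet? parts 0 with
      | none => max_id                    -- IndexError → continue
      | some p0 =>
        match PySem.Int.ofStr? p0 with
        | none => max_id                  -- ValueError → continue
        | some id_ => if id_ > max_id then id_ else max_id) 0) + 1

-- ===== PORT B =====
-- helper _parse_id: int of the first '|'-field, none on ValueError
def pvParseId? (line : String) : Option Int :=
  PySem.Int.ofStr? (((PySem.Str.split? line "|").getD []).headD "")

def generate_new_id_alt (lines : List String) : Int :=
  let ids := PySem.List.sorted (lines.filterMap pvParseId?) (fun x => x) true
  match ids with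
  | [] => 1
  | top :: _ => if top > 0 then top + 1 else 1

-- ===== PRECONDITION & SPEC =====
def Spec_generate_new_id (lines : List String) (out : Int) : Prop := out = generate_new_id_alt lines
instance (lines : List String) (out : Int) : Decidable (Spec_generate_new_id lines out) := by unfold Spec_generate_new_id; infer_instance

-- ===== CLAIM (what is proved, stated in full; the proofs are below) =====
def Claim_equal_generate_new_id : Prop := ∀ (lines : List String), Dom_generate_new_id lines → Spec_generate_new_id lines (generate_new_id lines)

-- ===== LEMMAS AND PROOFS =====

-- A's loop body, as a function of the parsed first-field id
theorem pv_step_eq :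
    (fun (max_id : Int) (line : String) =>
      let parts := (PySem.Str.split? line "|").getD []
      match PySem.List.pyGet? parts 0 with
      | none => max_id
      | some p0 =>
        match PySem.Int.ofStr? p0 with
        | none => max_id
        | some id_ => if id_ > max_id then id_ else max_id)
    = (fun (m : Int) (line : String) =>
        match pvParseId? line with
        | none => m
        | some i => max m i) := by
  funext m line
  unfold pvParseId?
  cases h : (PySem.Str.split? line "|").getD [] with
  | nil =>
    have h0 : PySem.Int.ofStr? "" = none := by decide
    simp [PySem.List.pyGet?, PySem.List.pyIdx?, h0]
  | cons p ps =>
    have hg : PySem.List.pyGet? (p :: ps) (0 : Int) = some p := by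
      simp [PySem.List.pyGet?, PySem.List.pyIdx?]
    simp only [hg, List.headD_cons]
    cases hi : PySem.Int.ofStr? p with
    | none => rfl
    | some i =>
      by_cases hlt : i > m <;> simp [hlt] <;> omega

-- running max over the parsed ids = fold of max over the collected list
theorem pv_runmax (lines : List String) : ∀ (m : Int),
    lines.foldl (fun m line =>
        match pvParseId? line with
        | none => m
        | some i => max m i) m
    = (lines.filterMap pvParseId?).foldl max m := by
  induction lines with
  | nil => intro m; rfl
  | cons l t ih =>
    intro m
    simp only [List.foldl_cons, List.filterMap_cons]
    cases h : pvParseId? l with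
    | none => exact ih m
    | some i => simpa using ih (max m i)

-- a fold of max stays at the accumulator when every element is below it
theorem pv_foldl_max_fix (l : List Int) : ∀ (a : Int), (∀ y ∈ l, y ≤ a) → l.foldl max a = a := by
  induction l with
  | nil => intro a _; rfl
  | cons x t ih =>
    intro a h
    have hx : max a x = a := by
      have := h x (by simp)
      omega
    simp only [List.foldl_cons, hx]
    exact ih a (fun y hy => h y (by simp [hy]))

-- a fold of max equals max of the accumulator and any member that dominates the list
theorem pv_foldl_max_top (l : List Int) : ∀ (a top : Int), top ∈ l → (∀ y ∈ l, y ≤ top) →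
    l.foldl max a = max a top := by
  induction l with
  | nil => intro a top h _; cases h
  | cons x t ih =>
    intro a top hmem hub
    simp only [List.foldl_cons]
    by_cases ht : top ∈ t
    · have hx : x ≤ top := hub x (by simp)
      rw [ih (max a x) top ht (fun y hy => hub y (by simp [hy]))]
      omega
    · have hx : x = top := by
        rcases List.mem_cons.mp hmem with h | h
        · exact h.symm
        · exact absurd h ht
      subst hx
      rw [pv_foldl_max_fix t (max a x) (fun y hy => by
        have := hub y (by simp [hy]); omega)]

-- ===== VERDICT (by name: the statement is the Claim_ definition above) =====
theorem generate_new_id_spec : Claim_equal_generate_new_id := by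
  intro lines _
  unfold Spec_generate_new_id generate_new_id generate_new_id_alt
  rw [pv_step_eq, pv_runmax]
  cases hs : PySem.List.sorted (lines.filterMap pvParseId?) (fun x => x) true with
  | nil =>
    have : lines.filterMap pvParseId? = [] := by
      have := (PySem.List.sorted_eq_nil_iff (xs := lines.filterMap pvParseId?)
        (key := fun x => x) (rev := true)).mp hs
      exact this
    simp [this]
  | cons top rest =>
    have htop : top ∈ lines.filterMap pvParseId? := by
      have : top ∈ PySem.List.sorted (lines.filterMap pvParseId?) (fun x => x) true := by
        simp [hs]
      exact (PySem.List.mem_sorted _ _ _ _).mp this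
    have hub : ∀ y ∈ lines.filterMap pvParseId?, y ≤ top :=
      PySem.List.key_head_sorted_rev_ge _ (fun x => x) hs
    rw [pv_foldl_max_top _ 0 top htop hub]
    simp only []
    by_cases h : top > 0 <;> simp [h] <;> omega
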